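-- pv_equiv track=rewrite | github.com/nay0101/document_comparison | helpers/document_processor.py | get_last_chunk
-- ===== SOURCE A (Python) =====
-- def get_last_chunk(text: str) -> str:
--     # Split by chunk opening tags
--     chunks = text.split('<chunk number="')
--
--     # Remove empty first split if any
--     if not chunks[0].strip():
--         chunks.pop(0)
--
--     # Look for last complete chunk
--     for chunk in reversed(chunks):
--         if "</chunk>" in chunk:
--             return f'<chunk number="{chunk}'
--     return ""
-- ===== SOURCE B (Python) =====
-- def get_last_chunk(text: str) -> str:
--     matches = [seg for seg in text.split('<chunk number="') if "</chunk>" in seg]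
--     return '<chunk number="' + matches[-1] if matches else ""
-- ===== Notes on version B (the rewrite author's own statement) =====
-- stated objective: simpler
-- what changed: Replaces A's conditional pop of a blank first segment plus a reversed early-return loop by a single filter of the split segments followed by taking the last match (the pop is provably redundant since an all-whitespace segment cannot contain '</chunk>').
import Mathlib
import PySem

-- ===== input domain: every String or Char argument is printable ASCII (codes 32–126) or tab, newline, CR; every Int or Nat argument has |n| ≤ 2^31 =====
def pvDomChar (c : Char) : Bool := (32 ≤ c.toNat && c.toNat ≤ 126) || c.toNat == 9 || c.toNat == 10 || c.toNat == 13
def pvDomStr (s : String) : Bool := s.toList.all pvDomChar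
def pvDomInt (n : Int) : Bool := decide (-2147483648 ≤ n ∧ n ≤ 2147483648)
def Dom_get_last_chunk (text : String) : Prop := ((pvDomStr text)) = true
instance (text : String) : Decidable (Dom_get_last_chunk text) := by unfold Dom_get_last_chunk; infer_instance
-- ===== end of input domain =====

-- B replaces A's conditional pop and reversed early-return loop by "filter the split
-- segments, take the last match" (the pop is redundant: an all-whitespace segment cannot
-- contain "</chunk>"); objective: simpler.


-- ===== PORT A =====
-- 'for chunk in reversed(chunks): if "</chunk>" in chunk: return f'<chunk number="{chunk}'' / 'return ""'
def pvGoA : List (List Char) → List Char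
  | [] => []
  | c :: rest =>
      if PySem.Chars.isIn "</chunk>".toList c then "<chunk number=\"".toList ++ c
      else pvGoA rest

def get_last_chunk (text : String) : String :=
  let chunks := PySem.Chars.splitOn text.toList "<chunk number=\"".toList
  -- 'if not chunks[0].strip(): chunks.pop(0)'  (split always returns a nonempty list, so [0] is safe)
  let chunks := if PySem.Chars.strip (chunks.headD []) = [] then chunks.drop 1 else chunks
  String.ofList (pvGoA chunks.reverse)

-- ===== PORT B =====
def get_last_chunk_alt (text : String) : String :=
  let ms := (PySem.Chars.splitOn text.toList "<chunk number=\"".toList).filter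
      (fun seg => PySem.Chars.isIn "</chunk>".toList seg)
  match ms.getLast? with
  | some seg => String.ofList ("<chunk number=\"".toList ++ seg)
  | none => ""

-- ===== PRECONDITION & SPEC =====
def Spec_get_last_chunk (text : String) (out : String) : Prop := out = get_last_chunk_alt text
instance (text : String) (out : String) : Decidable (Spec_get_last_chunk text out) := by unfold Spec_get_last_chunk; infer_instance

-- ===== CLAIM (what is proved, stated in full; the proofs are below) =====
def Claim_equal_get_last_chunk : Prop := ∀ (text : String), Dom_get_last_chunk text → Spec_get_last_chunk text (get_last_chunk text)

-- ===== LEMMAS AND PROOFS =====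

-- A's reversed early-return loop returns the first match of the list it scans
theorem pvGoA_eq_head? (m : List (List Char)) :
    pvGoA m = (match (m.filter (fun seg => PySem.Chars.isIn "</chunk>".toList seg)).head? with
      | some seg => "<chunk number=\"".toList ++ seg
      | none => []) := by
  induction m with
  | nil => rfl
  | cons c rest ih =>
      rw [pvGoA, List.filter_cons]
      by_cases h : PySem.Chars.isIn "</chunk>".toList c = true
      · rw [if_pos h, if_pos h, List.head?_cons]
      · rw [if_neg h, if_neg h]
        exact ih

-- first match scanning from the back = last match of the list
theorem pvGoA_reverse (l : List (List Char)) :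
    pvGoA l.reverse = (match (l.filter (fun seg => PySem.Chars.isIn "</chunk>".toList seg)).getLast? with
      | some seg => "<chunk number=\"".toList ++ seg
      | none => []) := by
  rw [pvGoA_eq_head?, List.filter_reverse, List.head?_reverse]

-- if every element left by dropWhile satisfies p, every element did
theorem pv_dropWhile_all {α : Type} {p : α → Bool} (l : List α)
    (h : ∀ x ∈ List.dropWhile p l, p x = true) : ∀ x ∈ l, p x = true := by
  induction l with
  | nil => simp
  | cons a t ih =>
      by_cases hpa : p a = true
      · rw [List.dropWhile_cons_of_pos hpa] at h
        intro x hx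
        rcases List.mem_cons.1 hx with rfl | hx
        · exact hpa
        · exact ih h x hx
      · rw [List.dropWhile_cons_of_neg hpa] at h
        exact h

-- a segment with empty strip() is all whitespace
theorem strip_nil_all_space (c : List Char) (h : PySem.Chars.strip c = []) :
    ∀ x ∈ c, PySem.Chars.isspace x = true := by
  unfold PySem.Chars.strip PySem.Chars.rstrip PySem.Chars.lstrip at h
  rw [List.reverse_eq_nil_iff] at h
  have h1 := List.dropWhile_eq_nil_iff.1 h
  exact pv_dropWhile_all c (fun x hx => h1 x (List.mem_reverse.2 hx))

-- so the segment A pops can never contain "</chunk>": the pop does not affect the result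
theorem strip_nil_no_term (c : List Char) (h : PySem.Chars.strip c = []) :
    PySem.Chars.isIn "</chunk>".toList c = false := by
  rw [PySem.Chars.isIn_eq_false_iff]
  intro hinf
  have hlt : '<' ∈ c := hinf.mem (by decide)
  have := strip_nil_all_space c h '<' hlt
  simp [PySem.Chars.isspace] at this

-- ===== VERDICT (by name: the statement is the Claim_ definition above) =====
theorem get_last_chunk_spec : Claim_equal_get_last_chunk := by
  intro text _
  show get_last_chunk text = get_last_chunk_alt text
  unfold get_last_chunk get_last_chunk_alt
  generalize PySem.Chars.splitOn text.toList "<chunk number=\"".toList = L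
  cases L with
  | nil => rfl
  | cons c rest =>
      dsimp only
      rw [List.headD_cons]
      by_cases h : PySem.Chars.strip c = []
      · rw [if_pos h, List.drop_succ_cons, List.drop_zero, pvGoA_reverse,
          List.filter_cons_of_neg (by rw [strip_nil_no_term c h]; exact Bool.false_ne_true)]
        cases (rest.filter (fun seg => PySem.Chars.isIn "</chunk>".toList seg)).getLast? <;> rfl
      · rw [if_neg h, pvGoA_reverse]
        cases ((c :: rest).filter (fun seg => PySem.Chars.isIn "</chunk>".toList seg)).getLast? <;> rfl
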